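-- pv_equiv track=rewrite | github.com/mateodd25/equivariant-MLP | emlp/reps/sequences.py | _compute_canonical
-- ===== SOURCE A (Python) =====
-- from functools import reduce
-- from collections import defaultdict
--
-- def _compute_canonical(seq_counters):
--     unique_seq = sorted(
--         reduce(lambda a, b: a | b, [seq.keys() for seq in seq_counters])
--     )
--     merged_counts = defaultdict(int)
--     for seq in unique_seq:
--         for cs in seq_counters:
--             if seq in cs:
--                 merged_counts[seq] += cs[seq]
--     return merged_counts
-- ===== SOURCE B (Python) =====
-- def _compute_canonical(seq_counters):
--     # One pass over all counter entries, then emit keys in sorted order.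
--     merged = {}
--     for cs in seq_counters:
--         for k, v in cs.items():
--             merged[k] = merged.get(k, 0) + v
--     return {k: merged[k] for k in sorted(merged)}
-- ===== Notes on version B (the rewrite author's own statement) =====
-- stated objective: faster
-- what changed: A scans every counter once per unique key after building and sorting the union of key sets; B makes a single pass over all counter entries accumulating totals into one dict and then emits the keys in sorted order.
import Mathlib
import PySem

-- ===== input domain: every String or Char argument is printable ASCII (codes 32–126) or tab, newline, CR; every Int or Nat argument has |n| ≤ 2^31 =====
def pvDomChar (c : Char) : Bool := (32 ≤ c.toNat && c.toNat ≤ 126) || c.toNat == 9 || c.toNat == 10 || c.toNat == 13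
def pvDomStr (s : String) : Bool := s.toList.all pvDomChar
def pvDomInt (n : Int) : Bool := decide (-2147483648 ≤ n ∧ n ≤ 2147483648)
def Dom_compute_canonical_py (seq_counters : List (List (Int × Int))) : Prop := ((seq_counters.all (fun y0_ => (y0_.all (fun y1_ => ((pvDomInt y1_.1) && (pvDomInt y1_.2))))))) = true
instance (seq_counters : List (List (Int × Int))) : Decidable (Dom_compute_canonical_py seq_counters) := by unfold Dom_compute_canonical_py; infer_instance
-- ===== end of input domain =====

-- B replaces A's per-unique-key rescans of every counter by ONE pass over all counter
-- entries accumulating into a dict, then emits the keys in sorted order (objective: faster).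

-- ===== PORT A =====
-- literal port of _compute_canonical: union of key sets, sorted; then for each unique
-- key scan every counter and accumulate into a defaultdict(int) (modify with default 0).
def compute_canonical_py (seq_counters : List (List (Int × Int))) : List (Int × Int) :=
  match seq_counters.map (fun seq => PySem.Set.ofList (PySem.Dict.mk seq).keys) with
  | [] => []   -- Python: reduce() of an empty iterable raises TypeError; excluded by Pre_
  | ks :: rest =>
    let unique_seq : List Int :=
      PySem.List.sorted (rest.foldl (fun a b => PySem.Set.union a b) ks) (fun k => k)
    let merged_counts : PySem.Dict Int Int :=
      unique_seq.foldl (fun mc seq =>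
        seq_counters.foldl (fun mc cs =>
          if (PySem.Dict.mk cs).contains seq then
            -- merged_counts[seq] += cs[seq]; cs[seq] cannot raise under the guard
            mc.modify seq 0 (fun x => x + ((PySem.Dict.mk cs).get? seq).getD 0)
          else mc) mc) PySem.Dict.empty
    merged_counts.items

-- ===== PORT B =====
-- literal port of Source B: one pass over all entries into 'merged', then a dict built
-- over the sorted keys; merged[k] cannot raise since k ∈ merged.
def compute_canonical_py_alt (seq_counters : List (List (Int × Int))) : List (Int × Int) :=
  let merged : PySem.Dict Int Int :=
    seq_counters.foldl (fun m cs =>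
      (PySem.Dict.mk cs).items.foldl
        (fun m kv => m.insert kv.1 (m.getD kv.1 0 + kv.2)) m)
      PySem.Dict.empty
  ((PySem.List.sorted merged.keys (fun k => k)).foldl
      (fun out k => out.insert k ((merged.get? k).getD 0)) PySem.Dict.empty).items

-- ===== PRECONDITION & SPEC =====
-- Pre_ excludes the empty list, on which A raises TypeError (reduce of an empty iterable),
-- and association lists with a duplicated key inside one counter, which do not represent
-- any Python dict (a dict cannot hold duplicate keys).
def Pre_compute_canonical_py (seq_counters : List (List (Int × Int))) : Prop :=
  seq_counters ≠ [] ∧ ∀ cs ∈ seq_counters, (cs.map Prod.fst).Nodup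
instance (seq_counters : List (List (Int × Int))) : Decidable (Pre_compute_canonical_py seq_counters) := by unfold Pre_compute_canonical_py; infer_instance
def pvWitness_compute_canonical_py : (List (List (Int × Int))) := [[(0, 1), (2, 3)], [(2, 5)]]

def Spec_compute_canonical_py (seq_counters : List (List (Int × Int))) (out : List (Int × Int)) : Prop := out = compute_canonical_py_alt seq_counters
instance (seq_counters : List (List (Int × Int))) (out : List (Int × Int)) : Decidable (Spec_compute_canonical_py seq_counters out) := by unfold Spec_compute_canonical_py; infer_instance

-- ===== CLAIM (what is proved, stated in full; the proofs are below) =====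
def Claim_equal_compute_canonical_py : Prop := ∀ (seq_counters : List (List (Int × Int))), Dom_compute_canonical_py seq_counters → Pre_compute_canonical_py seq_counters → Spec_compute_canonical_py seq_counters (compute_canonical_py seq_counters)

-- ===== LEMMAS AND PROOFS =====

-- the value both programs associate with a key: the sum of that key's counts over all counters
def keyTotal (scs : List (List (Int × Int))) (k : Int) : Int :=
  (scs.map (fun cs => (PySem.Dict.mk cs).getD k 0)).sum

-- does any counter contain the key?
def hasKey (scs : List (List (Int × Int))) (k : Int) : Bool :=
  scs.any (fun cs => (PySem.Dict.mk cs).contains k)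

theorem keyTotal_cons (cs : List (Int × Int)) (scs : List (List (Int × Int))) (k : Int) :
    keyTotal (cs :: scs) k = (PySem.Dict.mk cs).getD k 0 + keyTotal scs k := by
  simp [keyTotal]

theorem mk_contains_iff (cs : List (Int × Int)) (k : Int) :
    (PySem.Dict.mk cs).contains k = true ↔ k ∈ cs.map Prod.fst := by
  rw [PySem.Dict.contains_eq_decide_mem_keys, PySem.Dict.keys_mk]
  simp


-- ---- A side: the inner scan over all counters at one key ----

theorem A_inner_getD_self (scs : List (List (Int × Int))) (d : PySem.Dict Int Int) (k : Int) :
    (scs.foldl (fun mc cs =>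
      if (PySem.Dict.mk cs).contains k then
        mc.modify k 0 (fun x => x + ((PySem.Dict.mk cs).get? k).getD 0)
      else mc) d).getD k 0 = d.getD k 0 + keyTotal scs k := by
  induction scs generalizing d with
  | nil => simp [keyTotal]
  | cons cs rest ih =>
    rw [List.foldl_cons, ih, keyTotal_cons]
    by_cases h : (PySem.Dict.mk cs).contains k = true
    · simp only [h, if_true, PySem.Dict.getD_modify_self, ← PySem.Dict.getD_eq_get?_getD]
      ring
    · rw [Bool.not_eq_true] at h
      simp only [h, Bool.false_eq_true, if_false]
      rw [PySem.Dict.getD_of_not_contains _ _ h]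
      ring

theorem A_inner_getD_ne (scs : List (List (Int × Int))) (d : PySem.Dict Int Int) (k j : Int)
    (hne : j ≠ k) :
    (scs.foldl (fun mc cs =>
      if (PySem.Dict.mk cs).contains k then
        mc.modify k 0 (fun x => x + ((PySem.Dict.mk cs).get? k).getD 0)
      else mc) d).getD j 0 = d.getD j 0 := by
  induction scs generalizing d with
  | nil => rfl
  | cons cs rest ih =>
    rw [List.foldl_cons, ih]
    by_cases h : (PySem.Dict.mk cs).contains k = true
    · simp [h, PySem.Dict.getD_modify, hne]
    · simp [h]

theorem A_inner_keys (scs : List (List (Int × Int))) (d : PySem.Dict Int Int) (k : Int) :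
    (scs.foldl (fun mc cs =>
      if (PySem.Dict.mk cs).contains k then
        mc.modify k 0 (fun x => x + ((PySem.Dict.mk cs).get? k).getD 0)
      else mc) d).keys =
      if k ∈ d.keys then d.keys else if hasKey scs k then d.keys ++ [k] else d.keys := by
  induction scs generalizing d with
  | nil => simp [hasKey]
  | cons cs rest ih =>
    have hkc : hasKey (cs :: rest) k = ((PySem.Dict.mk cs).contains k || hasKey rest k) := rfl
    rw [List.foldl_cons, ih, hkc]
    by_cases h : (PySem.Dict.mk cs).contains k = true
    · rw [h, Bool.true_or]
      by_cases hd : k ∈ d.keys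
      · have hc : d.contains k = true := by
          rw [PySem.Dict.contains_eq_decide_mem_keys]; simpa
        simp only [if_true, PySem.Dict.keys_modify,
          PySem.Dict.keys_insert_of_contains _ _ hc, hd, if_true]
      · have hc : d.contains k = false := by
          rw [PySem.Dict.contains_eq_decide_mem_keys]; simpa
        simp only [if_true, PySem.Dict.keys_modify,
          PySem.Dict.keys_insert_of_not_contains _ _ hc]
        rw [if_pos (by simp), if_neg hd]
    · rw [Bool.not_eq_true] at h
      rw [h, Bool.false_or]
      simp only [Bool.false_eq_true, if_false]


-- ---- A side: the union of the key sets and the outer loop over unique keys ----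

theorem mem_foldl_union (rest : List (PySem.Set Int)) (ks : PySem.Set Int) (k : Int) :
    k ∈ rest.foldl (fun a b => PySem.Set.union a b) ks ↔ k ∈ ks ∨ ∃ s ∈ rest, k ∈ s := by
  induction rest generalizing ks with
  | nil => simp
  | cons s rest ih =>
    rw [List.foldl_cons, ih]
    simp only [PySem.Set.mem_union, List.mem_cons]
    constructor
    · rintro ((h | h) | ⟨t, ht, hk⟩)
      · exact Or.inl h
      · exact Or.inr ⟨s, Or.inl rfl, h⟩
      · exact Or.inr ⟨t, Or.inr ht, hk⟩
    · rintro (h | ⟨t, (rfl | ht), hk⟩)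
      · exact Or.inl (Or.inl h)
      · exact Or.inl (Or.inr hk)
      · exact Or.inr ⟨t, ht, hk⟩

theorem nodup_foldl_union (rest : List (PySem.Set Int)) (ks : PySem.Set Int)
    (h : ks.Nodup) : (rest.foldl (fun a b => PySem.Set.union a b) ks).Nodup := by
  induction rest generalizing ks with
  | nil => exact h
  | cons s rest ih => exact ih _ (PySem.Set.nodup_union _ _ h)

theorem A_outer_keys (scs : List (List (Int × Int))) (u : List Int) (d : PySem.Dict Int Int)
    (hfresh : ∀ k ∈ u, k ∉ d.keys) (hnd : u.Nodup) (hhas : ∀ k ∈ u, hasKey scs k = true) :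
    (u.foldl (fun mc seq =>
      scs.foldl (fun mc cs =>
        if (PySem.Dict.mk cs).contains seq then
          mc.modify seq 0 (fun x => x + ((PySem.Dict.mk cs).get? seq).getD 0)
        else mc) mc) d).keys = d.keys ++ u := by
  induction u generalizing d with
  | nil => simp
  | cons k rest ih =>
    rw [List.foldl_cons]
    have hk1 : (scs.foldl (fun mc cs =>
        if (PySem.Dict.mk cs).contains k then
          mc.modify k 0 (fun x => x + ((PySem.Dict.mk cs).get? k).getD 0)
        else mc) d).keys = d.keys ++ [k] := by
      rw [A_inner_keys, if_neg (hfresh k (List.mem_cons_self) ), if_pos (hhas k List.mem_cons_self)]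
    rw [ih _ ?_ hnd.of_cons (fun j hj => hhas j (List.mem_cons_of_mem _ hj)), hk1,
      List.append_assoc, List.singleton_append]
    intro j hj
    rw [hk1]
    have hknot : k ∉ rest := (List.nodup_cons.mp hnd).1
    simp only [List.mem_append, List.mem_singleton]
    rintro (h | rfl)
    · exact hfresh j (List.mem_cons_of_mem _ hj) h
    · exact hknot hj

theorem A_outer_getD_not (scs : List (List (Int × Int))) (u : List Int) (d : PySem.Dict Int Int)
    (j : Int) (hj : j ∉ u) :
    (u.foldl (fun mc seq =>
      scs.foldl (fun mc cs =>
        if (PySem.Dict.mk cs).contains seq then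
          mc.modify seq 0 (fun x => x + ((PySem.Dict.mk cs).get? seq).getD 0)
        else mc) mc) d).getD j 0 = d.getD j 0 := by
  induction u generalizing d with
  | nil => rfl
  | cons k rest ih =>
    rw [List.foldl_cons, ih _ (fun h => hj (List.mem_cons_of_mem _ h)),
      A_inner_getD_ne _ _ _ _ (fun h : j = k => hj (h ▸ List.mem_cons_self))]

theorem A_outer_getD (scs : List (List (Int × Int))) (u : List Int) (d : PySem.Dict Int Int)
    (j : Int) (hnd : u.Nodup) (hj : j ∈ u) :
    (u.foldl (fun mc seq =>
      scs.foldl (fun mc cs =>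
        if (PySem.Dict.mk cs).contains seq then
          mc.modify seq 0 (fun x => x + ((PySem.Dict.mk cs).get? seq).getD 0)
        else mc) mc) d).getD j 0 = d.getD j 0 + keyTotal scs j := by
  induction u generalizing d with
  | nil => cases hj
  | cons k rest ih =>
    rw [List.foldl_cons]
    by_cases hjk : j = k
    · subst hjk
      have hnot : j ∉ rest := (List.nodup_cons.mp hnd).1
      rw [A_outer_getD_not scs rest _ j hnot, A_inner_getD_self]
    · have hjr : j ∈ rest := by
        rcases List.mem_cons.mp hj with h | h
        · exact absurd h hjk
        · exact h
      rw [ih _ hnd.of_cons hjr, A_inner_getD_ne _ _ _ _ hjk]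


-- ---- B side: the single accumulation pass ----

theorem B_inner_getD_not (cs : List (Int × Int)) (d : PySem.Dict Int Int) (k : Int)
    (h : k ∉ cs.map Prod.fst) :
    (cs.foldl (fun m kv => m.insert kv.1 (m.getD kv.1 0 + kv.2)) d).getD k 0 = d.getD k 0 := by
  induction cs generalizing d with
  | nil => rfl
  | cons kv rest ih =>
    simp only [List.map_cons, List.mem_cons, not_or] at h
    rw [List.foldl_cons, ih _ h.2, PySem.Dict.getD_insert, if_neg h.1]

theorem B_inner_getD (cs : List (Int × Int)) (d : PySem.Dict Int Int) (k : Int)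
    (hn : (cs.map Prod.fst).Nodup) :
    (cs.foldl (fun m kv => m.insert kv.1 (m.getD kv.1 0 + kv.2)) d).getD k 0 =
      d.getD k 0 + (PySem.Dict.mk cs).getD k 0 := by
  induction cs generalizing d with
  | nil => simp [PySem.Dict.getD_eq_get?_getD]; rfl
  | cons kv rest ih =>
    simp only [List.map_cons, List.nodup_cons] at hn
    rw [List.foldl_cons]
    have hmk : (PySem.Dict.mk (kv :: rest)).getD k 0 =
        if kv.1 = k then kv.2 else (PySem.Dict.mk rest).getD k 0 := by
      rw [PySem.Dict.getD_eq_get?_getD, PySem.Dict.getD_eq_get?_getD, PySem.Dict.get?_mk_cons]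
      by_cases h : kv.1 = k <;> simp [h]
    by_cases h : k = kv.1
    · subst h
      rw [B_inner_getD_not _ _ _ hn.1, PySem.Dict.getD_insert, if_pos rfl, hmk, if_pos rfl,
        PySem.Dict.getD_eq_get?_getD]
    · rw [ih _ hn.2, PySem.Dict.getD_insert, if_neg h, hmk, if_neg (fun hh => h hh.symm)]

theorem B_merged_getD (scs : List (List (Int × Int))) (d : PySem.Dict Int Int) (k : Int)
    (hn : ∀ cs ∈ scs, (cs.map Prod.fst).Nodup) :
    (scs.foldl (fun m cs =>
        (PySem.Dict.mk cs).items.foldl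
          (fun m kv => m.insert kv.1 (m.getD kv.1 0 + kv.2)) m) d).getD k 0 =
      d.getD k 0 + keyTotal scs k := by
  induction scs generalizing d with
  | nil => simp [keyTotal]
  | cons cs rest ih =>
    rw [List.foldl_cons, ih _ (fun c hc => hn c (List.mem_cons_of_mem _ hc)), keyTotal_cons]
    have : (PySem.Dict.mk cs).items = cs := rfl
    rw [this, B_inner_getD _ _ _ (hn cs List.mem_cons_self)]
    ring

theorem B_merged_keys_mem (scs : List (List (Int × Int))) (d : PySem.Dict Int Int) (k : Int) :
    k ∈ (scs.foldl (fun m cs =>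
        (PySem.Dict.mk cs).items.foldl
          (fun m kv => m.insert kv.1 (m.getD kv.1 0 + kv.2)) m) d).keys ↔
      k ∈ d.keys ∨ ∃ cs ∈ scs, k ∈ cs.map Prod.fst := by
  induction scs generalizing d with
  | nil => simp
  | cons cs rest ih =>
    rw [List.foldl_cons, ih]
    have : (PySem.Dict.mk cs).items = cs := rfl
    rw [this, PySem.Dict.keys_foldl_insert_key cs Prod.fst (fun m kv => m.getD kv.1 0 + kv.2) d]
    rw [PySem.Set.mem_update]
    simp only [List.mem_cons]
    constructor
    · rintro ((h | h) | ⟨t, ht, hk⟩)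
      · exact Or.inl h
      · exact Or.inr ⟨cs, Or.inl rfl, h⟩
      · exact Or.inr ⟨t, Or.inr ht, hk⟩
    · rintro (h | ⟨t, (rfl | ht), hk⟩)
      · exact Or.inl (Or.inl h)
      · exact Or.inl (Or.inr hk)
      · exact Or.inr ⟨t, ht, hk⟩

theorem B_merged_keys_nodup (scs : List (List (Int × Int))) (d : PySem.Dict Int Int)
    (h : d.keys.Nodup) :
    (scs.foldl (fun m cs =>
        (PySem.Dict.mk cs).items.foldl
          (fun m kv => m.insert kv.1 (m.getD kv.1 0 + kv.2)) m) d).keys.Nodup := by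
  induction scs generalizing d with
  | nil => exact h
  | cons cs rest ih =>
    rw [List.foldl_cons]
    exact ih _ (PySem.Dict.nodup_keys_foldl_insert_key _ Prod.fst _ _ h)


-- ---- putting the two characterizations together ----

theorem B_char (scs : List (List (Int × Int)))
    (hn : ∀ cs ∈ scs, (cs.map Prod.fst).Nodup) :
    compute_canonical_py_alt scs =
      (PySem.List.sorted
          (scs.foldl (fun m cs =>
            (PySem.Dict.mk cs).items.foldl
              (fun m kv => m.insert kv.1 (m.getD kv.1 0 + kv.2)) m) PySem.Dict.empty).keys
          (fun k => k)).map (fun k => (k, keyTotal scs k)) := by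
  unfold compute_canonical_py_alt
  set M := scs.foldl (fun m cs =>
    (PySem.Dict.mk cs).items.foldl
      (fun m kv => m.insert kv.1 (m.getD kv.1 0 + kv.2)) m) PySem.Dict.empty with hM
  have hkeys : M.keys.Nodup := B_merged_keys_nodup scs _ PySem.Dict.nodup_keys_empty
  have hsortnd : (PySem.List.sorted M.keys (fun k => k)).Nodup :=
    (PySem.List.sorted_perm M.keys (fun k => k) false).nodup_iff.mpr hkeys
  rw [PySem.Dict.items_foldl_insert_fresh (PySem.List.sorted M.keys (fun k => k))
    (fun a => a) (fun a => (M.get? a).getD 0) PySem.Dict.empty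
    (fun a _ => PySem.Dict.contains_empty a) (by simpa using hsortnd)]
  have hempty : (PySem.Dict.empty : PySem.Dict Int Int).items = [] := rfl
  rw [hempty, List.nil_append]
  apply List.map_congr_left
  intro a _
  rw [← PySem.Dict.getD_eq_get?_getD, B_merged_getD scs _ a hn, PySem.Dict.getD_empty, zero_add]

theorem A_eq_B (scs : List (List (Int × Int)))
    (hne : scs ≠ []) (hn : ∀ cs ∈ scs, (cs.map Prod.fst).Nodup) :
    compute_canonical_py scs = compute_canonical_py_alt scs := by
  obtain ⟨c0, rest0, rfl⟩ := List.exists_cons_of_ne_nil hne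
  -- the unique key set A builds
  set S := (rest0.map (fun seq => PySem.Set.ofList (PySem.Dict.mk seq).keys)).foldl
    (fun a b => PySem.Set.union a b) (PySem.Set.ofList (PySem.Dict.mk c0).keys) with hS
  have hSnodup : S.Nodup := nodup_foldl_union _ _ (PySem.Set.nodup_ofList _)
  have hmemS : ∀ k : Int, k ∈ S ↔ ∃ cs ∈ c0 :: rest0, k ∈ cs.map Prod.fst := by
    intro k
    rw [hS, mem_foldl_union]
    simp only [List.mem_map, PySem.Set.mem_ofList, PySem.Dict.keys_mk, List.mem_cons]
    constructor
    · rintro (h | ⟨s, ⟨cs, hcs, rfl⟩, hk⟩)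
      · exact ⟨c0, Or.inl rfl, by simpa using h⟩
      · exact ⟨cs, Or.inr hcs, by simpa using hk⟩
    · rintro ⟨cs, (rfl | hcs), hk⟩
      · exact Or.inl (by simpa using hk)
      · exact Or.inr ⟨_, ⟨cs, hcs, rfl⟩, by simpa using hk⟩
  set U := PySem.List.sorted S (fun k => k) with hU
  have hUnodup : U.Nodup := (PySem.List.sorted_perm S (fun k => k) false).nodup_iff.mpr hSnodup
  have hUhas : ∀ k ∈ U, hasKey (c0 :: rest0) k = true := by
    intro k hk
    rw [hU, PySem.List.mem_sorted] at hk
    obtain ⟨cs, hcs, hkk⟩ := (hmemS k).mp hk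
    unfold hasKey
    rw [List.any_eq_true]
    exact ⟨cs, hcs, (mk_contains_iff cs k).mpr hkk⟩
  -- A's result
  have hA : compute_canonical_py (c0 :: rest0) = U.map (fun k => (k, keyTotal (c0 :: rest0) k)) := by
    show ((U.foldl (fun mc seq =>
        (c0 :: rest0).foldl (fun mc cs =>
          if (PySem.Dict.mk cs).contains seq then
            mc.modify seq 0 (fun x => x + ((PySem.Dict.mk cs).get? seq).getD 0)
          else mc) mc) PySem.Dict.empty)).items = _
    set MA := U.foldl (fun mc seq =>
        (c0 :: rest0).foldl (fun mc cs =>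
          if (PySem.Dict.mk cs).contains seq then
            mc.modify seq 0 (fun x => x + ((PySem.Dict.mk cs).get? seq).getD 0)
          else mc) mc) PySem.Dict.empty with hMA
    have hkeysA : MA.keys = U := by
      rw [hMA, A_outer_keys (c0 :: rest0) U PySem.Dict.empty
        (by simp [PySem.Dict.keys_empty]) hUnodup hUhas, PySem.Dict.keys_empty, List.nil_append]
    have hndA : MA.keys.Nodup := hkeysA ▸ hUnodup
    rw [PySem.Dict.items_eq_map_keys MA hndA 0, hkeysA]
    apply List.map_congr_left
    intro a ha
    rw [hMA, A_outer_getD (c0 :: rest0) U PySem.Dict.empty a hUnodup ha,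
      PySem.Dict.getD_empty, zero_add]
  -- B's result
  rw [hA, B_char _ hn]
  -- the two sorted key lists coincide
  have hperm : S.Perm ((c0 :: rest0).foldl (fun m cs =>
      (PySem.Dict.mk cs).items.foldl
        (fun m kv => m.insert kv.1 (m.getD kv.1 0 + kv.2)) m) PySem.Dict.empty).keys := by
    refine (List.perm_ext_iff_of_nodup hSnodup
      (B_merged_keys_nodup _ _ PySem.Dict.nodup_keys_empty)).mpr ?_
    intro a
    rw [hmemS, B_merged_keys_mem]
    simp [PySem.Dict.keys_empty]
  rw [hU, PySem.List.sorted_eq_sorted_of_perm _ _ (fun k => k) (fun a b h => h) hperm]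





-- ===== VERDICT (by name: the statement is the Claim_ definition above) =====
theorem compute_canonical_py_spec : Claim_equal_compute_canonical_py := by
  intro scs _ hpre
  unfold Spec_compute_canonical_py
  exact A_eq_B scs hpre.1 hpre.2
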